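-- pv_equiv track=rewrite | github.com/Wlodzimierz-Lewoniewski/zadanie-0-Insekt0071 | main.py | process_documents
-- ===== SOURCE A (Python) =====
-- import string
-- from collections import defaultdict
--
-- def clean_word(word):
--     return word.strip(string.punctuation).lower()
--
-- def process_documents(n, documents, m, queries):
--     word_to_docs = defaultdict(lambda: defaultdict(int))
--
--     for i in range(n):
--         words = documents[i].split()
--         for word in words:
--             cleaned_word = clean_word(word)
--             if cleaned_word:
--                 word_to_docs[cleaned_word][i] += 1
--
--     result = []
--     for query in queries:
--         cleaned_query = clean_word(query)
--         if cleaned_query in word_to_docs: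
--             doc_freq_list = list(word_to_docs[cleaned_query].items())
--             doc_freq_list.sort(key=lambda x: (-x[1], x[0]))
--             result.append([doc_idx for doc_idx, _ in doc_freq_list])
--         else:
--             result.append([])
--     return result
-- ===== SOURCE B (Python) =====
-- # B: per-document word-count maps scanned per query, instead of A's nested inverted index.
-- import string
--
-- def clean_word(word):
--     return word.strip(string.punctuation).lower()
--
-- def process_documents(n, documents, m, queries):
--     counters = []
--     for i in range(n):
--         cnt = {}
--         for word in documents[i].split():
--             w = clean_word(word)
--             if w:
--                 cnt[w] = cnt.get(w, 0) + 1
--         counters.append(cnt)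
--     result = []
--     for query in queries:
--         q = clean_word(query)
--         hits = [(i, c[q]) for i, c in enumerate(counters) if q in c]
--         hits.sort(key=lambda x: (-x[1], x[0]))
--         result.append([i for i, _ in hits])
--     return result
-- ===== Notes on version B (the rewrite author's own statement) =====
-- stated objective: alternative
-- what changed: Replaces A's nested inverted index (word -> doc -> freq built once, one lookup per query) by one flat word-count map per document, scanning all documents at query time and sorting the collected (doc, count) pairs by (-count, doc).
import Mathlib
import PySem

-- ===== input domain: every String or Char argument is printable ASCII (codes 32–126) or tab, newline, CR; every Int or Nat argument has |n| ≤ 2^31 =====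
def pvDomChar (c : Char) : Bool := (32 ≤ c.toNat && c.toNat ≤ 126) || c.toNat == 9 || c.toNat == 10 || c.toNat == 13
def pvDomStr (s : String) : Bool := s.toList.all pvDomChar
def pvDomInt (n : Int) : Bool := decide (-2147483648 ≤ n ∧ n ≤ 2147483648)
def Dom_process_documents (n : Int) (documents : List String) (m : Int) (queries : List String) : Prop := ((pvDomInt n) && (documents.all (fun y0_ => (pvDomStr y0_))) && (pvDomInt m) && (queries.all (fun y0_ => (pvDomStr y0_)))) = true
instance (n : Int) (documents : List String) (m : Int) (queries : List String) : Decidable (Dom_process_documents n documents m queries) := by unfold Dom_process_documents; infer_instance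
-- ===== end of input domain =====

-- B replaces A's nested inverted index (word -> doc -> freq) by one word-count map per document
-- scanned at query time; same results, different data structure (objective: alternative).

-- string.punctuation
def pvPunct : String := "!\"#$%&'()*+,-./:;<=>?@[\\]^_`{|}~"

-- clean_word(word) = word.strip(string.punctuation).lower()
def pvClean (w : String) : String := PySem.Str.lower (PySem.Str.stripChars w pvPunct)

-- ===== PORT A =====
-- body of A's outer loop: process document i into the nested dict word -> (doc -> freq)
def pvDocStep (documents : List String) (d : PySem.Dict String (PySem.Dict Int Int)) (i : Int) :
    PySem.Dict String (PySem.Dict Int Int) :=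
  (PySem.Str.split₀ (PySem.List.pyGetD documents i "")).foldl
    (fun d word =>
      let c := pvClean word
      if c = "" then d
      else d.insert c (((d.getD c PySem.Dict.empty).insert i
            ((d.getD c PySem.Dict.empty).getD i 0 + 1))))
    d

def process_documents (n : Int) (documents : List String) (m : Int) (queries : List String) : List (List Int) :=
  let wtd := (PySem.List.pyRange 0 n).foldl (pvDocStep documents) PySem.Dict.empty
  queries.foldl
    (fun res query =>
      let cq := pvClean query
      if wtd.contains cq then
        res ++ [(PySem.List.sorted2 (wtd.getD cq PySem.Dict.empty).items
                  (fun x => -x.2) (fun x => x.1)).map (fun p => p.1)]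
      else res ++ [([] : List Int)])
    []

-- ===== PORT B =====
-- word-count map of document i (cleaned non-empty words)
def pvDocCounter (documents : List String) (i : Int) : PySem.Dict String Int :=
  (PySem.Str.split₀ (PySem.List.pyGetD documents i "")).foldl
    (fun c word =>
      let w := pvClean word
      if w = "" then c else c.insert w (c.getD w 0 + 1))
    PySem.Dict.empty

def process_documents_alt (n : Int) (documents : List String) (m : Int) (queries : List String) : List (List Int) :=
  let counters := (PySem.List.pyRange 0 n).foldl
    (fun acc i => acc ++ [pvDocCounter documents i]) ([] : List (PySem.Dict String Int))
  queries.foldl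
    (fun res query =>
      let q := pvClean query
      let hits := ((PySem.List.enumerate counters).filter (fun p => p.2.contains q)).map
        (fun p => (p.1, p.2.getD q 0))
      res ++ [(PySem.List.sorted2 hits (fun x => -x.2) (fun x => x.1)).map (fun p => p.1)])
    []

-- ===== PRECONDITION & SPEC =====
-- A raises IndexError (documents[i]) iff n > len(documents); Pre_ excludes exactly those inputs.
def Pre_process_documents (n : Int) (documents : List String) (m : Int) (queries : List String) : Prop :=
  n ≤ (documents.length : Int)
instance (n : Int) (documents : List String) (m : Int) (queries : List String) : Decidable (Pre_process_documents n documents m queries) := by unfold Pre_process_documents; infer_instance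

def pvWitness_process_documents : Int × List String × Int × List String :=
  (2, ["the cat, the Hat", "a cat"], 2, ["cat!", "dog"])

def Spec_process_documents (n : Int) (documents : List String) (m : Int) (queries : List String) (out : List (List Int)) : Prop := out = process_documents_alt n documents m queries
instance (n : Int) (documents : List String) (m : Int) (queries : List String) (out : List (List Int)) : Decidable (Spec_process_documents n documents m queries out) := by unfold Spec_process_documents; infer_instance

-- ===== CLAIM (what is proved, stated in full; the proofs are below) =====
def Claim_equal_process_documents : Prop := ∀ (n : Int) (documents : List String) (m : Int) (queries : List String), Dom_process_documents n documents m queries → Pre_process_documents n documents m queries → Spec_process_documents n documents m queries (process_documents n documents m queries)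

-- ===== LEMMAS AND PROOFS =====

-- the word-level step functions of the two ports
def pvStepA (i : Int) (d : PySem.Dict String (PySem.Dict Int Int)) (word : String) :
    PySem.Dict String (PySem.Dict Int Int) :=
  let c := pvClean word
  if c = "" then d
  else d.insert c (((d.getD c PySem.Dict.empty).insert i
        ((d.getD c PySem.Dict.empty).getD i 0 + 1)))

def pvStepB (c : PySem.Dict String Int) (word : String) : PySem.Dict String Int :=
  let w := pvClean word
  if w = "" then c else c.insert w (c.getD w 0 + 1)

theorem pvDocStep_eq (documents : List String) (d : PySem.Dict String (PySem.Dict Int Int)) (i : Int) :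
    pvDocStep documents d i
      = (PySem.Str.split₀ (PySem.List.pyGetD documents i "")).foldl (pvStepA i) d := rfl

theorem pvDocCounter_eq (documents : List String) (i : Int) :
    pvDocCounter documents i
      = (PySem.Str.split₀ (PySem.List.pyGetD documents i "")).foldl pvStepB PySem.Dict.empty := rfl

theorem pvContains_insert {κ ν : Type} [BEq κ] [LawfulBEq κ] (d : PySem.Dict κ ν) (k k' : κ) (v : ν) :
    (d.insert k v).contains k' = (k' == k || d.contains k') := by
  rw [PySem.Dict.contains_eq_isSome_get?, PySem.Dict.contains_eq_isSome_get?]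
  by_cases h : k' = k
  · subst h; simp [PySem.Dict.get?_insert_self]
  · rw [PySem.Dict.get?_insert_of_ne d v h]; simp [h]

theorem pvItems_insert_ne_nil {κ ν : Type} [BEq κ] (d : PySem.Dict κ ν) (k : κ) (v : ν) :
    (d.insert k v).items ≠ [] := by
  by_cases h : d.contains k
  · rw [PySem.Dict.items_insert_of_contains d v h]
    have hne : d.items ≠ [] := by
      intro e; simp [PySem.Dict.contains, e] at h
    simp [hne]
  · rw [PySem.Dict.items_insert_of_not_contains d v (by simpa using h)]; simp


theorem pvGetD_append (dd : PySem.Dict Int Int) (L : List (Int × Int)) (i v : Int)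
    (h : dd.items = L ++ [(i, v)]) (hL : List.find? (fun p => p.1 == i) L = none) :
    dd.getD i 0 = v := by
  simp [PySem.Dict.getD, PySem.Dict.get?, h, List.find?_append, hL]

theorem pvGetD_none (dd : PySem.Dict Int Int) (i : Int)
    (h : List.find? (fun p => p.1 == i) dd.items = none) : dd.getD i 0 = 0 := by
  simp [PySem.Dict.getD, PySem.Dict.get?, h]

-- inner invariant: after processing the same words, the nested dict's row at every key q'
-- is the old row followed by (i, current count) exactly when the counter contains q'
theorem pvDoc_lemma (i : Int) :
    ∀ (ws : List String) (d : PySem.Dict String (PySem.Dict Int Int))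
      (c : PySem.Dict String Int) (base : String → List (Int × Int)),
      (∀ q' p, p ∈ base q' → p.1 ≠ i) →
      (∀ q', ((d.getD q' PySem.Dict.empty).items
          = base q' ++ (if c.contains q' then [(i, c.getD q' 0)] else []))) →
      ∀ q', (((ws.foldl (pvStepA i) d).getD q' PySem.Dict.empty).items
          = base q' ++ (if (ws.foldl pvStepB c).contains q' then
              [(i, (ws.foldl pvStepB c).getD q' 0)] else [])) := by
  intro ws
  induction ws with
  | nil => intro d c base hbase hinv q'; simpa using hinv q'
  | cons w ws ih =>
    intro d c base hbase hinv q'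
    rw [List.foldl_cons, List.foldl_cons]
    by_cases hw : pvClean w = ""
    · have hA : pvStepA i d w = d := by
        simp only [pvStepA]; rw [if_pos hw]
      have hB : pvStepB c w = c := by
        simp only [pvStepB]; rw [if_pos hw]
      rw [hA, hB]; exact ih d c base hbase hinv q'
    · have hA : pvStepA i d w
          = d.insert (pvClean w) (((d.getD (pvClean w) PySem.Dict.empty).insert i
              ((d.getD (pvClean w) PySem.Dict.empty).getD i 0 + 1))) := by
        simp only [pvStepA]; rw [if_neg hw]
      have hB : pvStepB c w = c.insert (pvClean w) (c.getD (pvClean w) 0 + 1) := by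
        simp only [pvStepB]; rw [if_neg hw]
      rw [hA, hB]
      apply ih _ _ base hbase
      intro q'
      rcases eq_or_ne q' (pvClean w) with rfl | hne
      · -- the updated key
        rw [PySem.Dict.getD_insert, if_pos rfl]
        have hcont : (c.insert (pvClean w) (c.getD (pvClean w) 0 + 1)).contains (pvClean w) = true := by
          rw [pvContains_insert]; simp
        rw [hcont, if_pos rfl, PySem.Dict.getD_insert, if_pos rfl]
        have hrow := hinv (pvClean w)
        by_cases hc : c.contains (pvClean w)
        · rw [if_pos hc] at hrow
          have hkeys : ∀ p ∈ base (pvClean w), (p.1 == i) = false := by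
            intro p hp; simpa using hbase _ p hp
          have hconti : (d.getD (pvClean w) PySem.Dict.empty).contains i = true := by
            simp [PySem.Dict.contains, hrow]
          have hfind : List.find? (fun p => p.1 == i) (base (pvClean w)) = none :=
            List.find?_eq_none.mpr (by intro p hp; simp [hkeys p hp])
          have hget : (d.getD (pvClean w) PySem.Dict.empty).getD i 0 = c.getD (pvClean w) 0 :=
            pvGetD_append _ _ _ _ hrow hfind
          rw [PySem.Dict.items_insert_of_contains _ _ hconti, hrow, hget]
          rw [List.map_append]
          have hmapbase : List.map (fun p => if p.1 == i then (i, c.getD (pvClean w) 0 + 1) else p)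
              (base (pvClean w)) = base (pvClean w) := by
            calc List.map (fun p => if p.1 == i then (i, c.getD (pvClean w) 0 + 1) else p)
                  (base (pvClean w))
                = List.map id (base (pvClean w)) :=
                  List.map_congr_left (fun p hp => by simp [hkeys p hp])
              _ = base (pvClean w) := List.map_id _
          have hmaplast : List.map (fun p => if p.1 == i then (i, c.getD (pvClean w) 0 + 1) else p)
              [(i, c.getD (pvClean w) 0)] = [(i, c.getD (pvClean w) 0 + 1)] := by
            simp
          rw [hmapbase, hmaplast]
        · rw [if_neg hc] at hrow
          simp only [List.append_nil] at hrow
          have hnconti : (d.getD (pvClean w) PySem.Dict.empty).contains i = false := by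
            simp only [PySem.Dict.contains, hrow]
            apply List.any_eq_false.mpr
            intro p hp; simpa using hbase _ p hp
          have hfind : List.find? (fun p => p.1 == i) (base (pvClean w)) = none :=
            List.find?_eq_none.mpr (by intro p hp; simpa using hbase _ p hp)
          have hget : (d.getD (pvClean w) PySem.Dict.empty).getD i 0 = 0 :=
            pvGetD_none _ _ (by rw [hrow]; exact hfind)
          have hget0 : c.getD (pvClean w) 0 = 0 := by
            have : c.get? (pvClean w) = none := by
              rw [PySem.Dict.contains_eq_isSome_get?] at hc
              cases hcg : c.get? (pvClean w) with
              | none => rfl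
              | some v => rw [hcg] at hc; simp at hc
            simp [PySem.Dict.getD, this]
          rw [PySem.Dict.items_insert_of_not_contains _ _ hnconti, hrow, hget, hget0]
      · -- untouched keys
        rw [PySem.Dict.getD_insert, if_neg hne]
        have h1 : (c.insert (pvClean w) (c.getD (pvClean w) 0 + 1)).contains q' = c.contains q' := by
          rw [pvContains_insert]; simp [hne]
        have h2 : (c.insert (pvClean w) (c.getD (pvClean w) 0 + 1)).getD q' 0 = c.getD q' 0 := by
          rw [PySem.Dict.getD_insert, if_neg hne]
        rw [h1, h2]; exact hinv q'

-- INV2: in A's nested dict, a key is present iff its row is non-empty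
def pvInv2 (d : PySem.Dict String (PySem.Dict Int Int)) : Prop :=
  ∀ q, d.contains q = !((d.getD q PySem.Dict.empty).items.isEmpty)

theorem pvInv2_stepA (i : Int) (d : PySem.Dict String (PySem.Dict Int Int)) (w : String)
    (h : pvInv2 d) : pvInv2 (pvStepA i d w) := by
  by_cases hw : pvClean w = ""
  · have hA : pvStepA i d w = d := by
      simp only [pvStepA]; rw [if_pos hw]
    rw [hA]; exact h
  · have hA : pvStepA i d w
        = d.insert (pvClean w) (((d.getD (pvClean w) PySem.Dict.empty).insert i
            ((d.getD (pvClean w) PySem.Dict.empty).getD i 0 + 1))) := by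
      simp only [pvStepA]; rw [if_neg hw]
    rw [hA]
    intro q
    rcases eq_or_ne q (pvClean w) with rfl | hne
    · rw [pvContains_insert, PySem.Dict.getD_insert, if_pos rfl]
      simp [pvItems_insert_ne_nil]
    · rw [pvContains_insert, PySem.Dict.getD_insert, if_neg hne]
      have hqe : (q == pvClean w) = false := by simpa using hne
      rw [hqe, Bool.false_or]; exact h q

theorem pvInv2_foldWords (i : Int) :
    ∀ (ws : List String) (d : PySem.Dict String (PySem.Dict Int Int)), pvInv2 d →
      pvInv2 (ws.foldl (pvStepA i) d) := by
  intro ws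
  induction ws with
  | nil => intro d h; exact h
  | cons w ws ih =>
    intro d h
    rw [List.foldl_cons]
    exact ih _ (pvInv2_stepA i d w h)

theorem pvInv2_fold (documents : List String) :
    ∀ (l : List Int) (d : PySem.Dict String (PySem.Dict Int Int)), pvInv2 d →
      pvInv2 (l.foldl (pvDocStep documents) d) := by
  intro l
  induction l with
  | nil => intro d h; exact h
  | cons i t ih =>
    intro d h
    rw [List.foldl_cons]
    exact ih _ (by rw [pvDocStep_eq]; exact pvInv2_foldWords i _ d h)

-- outer invariant over the document loop
theorem pvFold_doc (documents : List String) (q : String) :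
    ∀ (l : List Int) (d : PySem.Dict String (PySem.Dict Int Int)),
      l.Nodup →
      (∀ q' p, p ∈ (d.getD q' PySem.Dict.empty).items → p.1 ∉ l) →
      ((l.foldl (pvDocStep documents) d).getD q PySem.Dict.empty).items
        = (d.getD q PySem.Dict.empty).items
          ++ (l.filter (fun i => (pvDocCounter documents i).contains q)).map
               (fun i => (i, (pvDocCounter documents i).getD q 0)) := by
  intro l
  induction l with
  | nil => intro d _ _; simp
  | cons i t ih =>
    intro d hnd hfresh
    simp only [List.foldl_cons]
    have hdoc : ∀ q', ((pvDocStep documents d i).getD q' PySem.Dict.empty).items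
        = (d.getD q' PySem.Dict.empty).items
          ++ (if (pvDocCounter documents i).contains q' then
              [(i, (pvDocCounter documents i).getD q' 0)] else []) := by
      intro q'
      rw [pvDocStep_eq, pvDocCounter_eq]
      exact pvDoc_lemma i _ d PySem.Dict.empty (fun q' => (d.getD q' PySem.Dict.empty).items)
        (fun q' p hp => by
          have := hfresh q' p hp
          intro e; exact this (e ▸ List.mem_cons_self))
        (fun q' => by simp [PySem.Dict.contains, PySem.Dict.empty]) q'
    have hfresh' : ∀ q' p, p ∈ ((pvDocStep documents d i).getD q' PySem.Dict.empty).items → p.1 ∉ t := by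
      intro q' p hp
      rw [hdoc q'] at hp
      rcases List.mem_append.mp hp with h1 | h1
      · exact fun ht => hfresh q' p h1 (List.mem_cons_of_mem i ht)
      · have : p = (i, (pvDocCounter documents i).getD q' 0) := by
          by_cases hc : (pvDocCounter documents i).contains q'
          · rw [if_pos hc] at h1; simpa using h1
          · rw [if_neg hc] at h1; simp at h1
        rw [this]
        exact (List.nodup_cons.mp hnd).1
    rw [ih _ (List.nodup_cons.mp hnd).2 hfresh', hdoc q, List.filter_cons]
    by_cases hc : (pvDocCounter documents i).contains q
    · simp [hc, List.append_assoc]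
    · simp [hc]

theorem pvRange_nodup (a b : Int) : (PySem.List.pyRange a b).Nodup := by
  have H : ∀ (k : Nat) (a b : Int), (b - a).toNat = k → (PySem.List.pyRange a b).Nodup := by
    intro k
    induction k with
    | zero => intro a b hk; rw [PySem.List.pyRange_one_eq_nil (by omega)]; exact List.nodup_nil
    | succ k ih =>
      intro a b hk
      by_cases h : a < b
      · rw [PySem.List.pyRange_one_cons h]
        refine List.Nodup.cons ?_ (ih (a+1) b (by omega))
        intro hmem
        have := (PySem.List.mem_pyRange_one).mp hmem
        omega
      · rw [PySem.List.pyRange_one_eq_nil (by omega)]; exact List.nodup_nil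
  exact H _ a b rfl

theorem pvEnum_map_pyRange {α : Type} (f : Int → α) (a b : Int) :
    PySem.List.enumerate ((PySem.List.pyRange a b).map f) a
      = (PySem.List.pyRange a b).map (fun i => (i, f i)) := by
  have H : ∀ (k : Nat) (a b : Int), (b - a).toNat = k →
      PySem.List.enumerate ((PySem.List.pyRange a b).map f) a
        = (PySem.List.pyRange a b).map (fun i => (i, f i)) := by
    intro k
    induction k with
    | zero => intro a b hk; rw [PySem.List.pyRange_one_eq_nil (by omega)]; rfl
    | succ k ih =>
      intro a b hk
      by_cases h : a < b
      · rw [PySem.List.pyRange_one_cons h]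
        simp only [List.map_cons, PySem.List.enumerate_cons]
        rw [ih (a+1) b (by omega)]
      · rw [PySem.List.pyRange_one_eq_nil (by omega)]; rfl
  exact H _ a b rfl

-- ===== VERDICT (by name: the statement is the Claim_ definition above) =====
theorem process_documents_spec : Claim_equal_process_documents := by
  intro n documents m queries _hdom _hpre
  unfold Spec_process_documents
  show process_documents n documents m queries = process_documents_alt n documents m queries
  simp only [process_documents, process_documents_alt]
  -- name the shared pieces
  set W := (PySem.List.pyRange 0 n).foldl (pvDocStep documents) PySem.Dict.empty with hW
  have hcounters : (PySem.List.pyRange 0 n).foldl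
      (fun acc i => acc ++ [pvDocCounter documents i]) ([] : List (PySem.Dict String Int))
      = (PySem.List.pyRange 0 n).map (pvDocCounter documents) := by
    simpa using PySem.List.foldl_append_singleton_eq_map (pvDocCounter documents) (PySem.List.pyRange 0 n) []
  have hitems : ∀ q, (W.getD q PySem.Dict.empty).items
      = ((PySem.List.pyRange 0 n).filter (fun i => (pvDocCounter documents i).contains q)).map
          (fun i => (i, (pvDocCounter documents i).getD q 0)) := by
    intro q
    have := pvFold_doc documents q (PySem.List.pyRange 0 n) PySem.Dict.empty
      (pvRange_nodup 0 n) (by intro q' p hp; simp [PySem.Dict.getD, PySem.Dict.get?, PySem.Dict.empty] at hp)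
    simpa [PySem.Dict.getD, PySem.Dict.get?, PySem.Dict.empty] using this
  have hinv2 : pvInv2 W := pvInv2_fold documents _ PySem.Dict.empty
    (by intro q; simp [PySem.Dict.contains, PySem.Dict.getD, PySem.Dict.get?, PySem.Dict.empty])
  rw [hcounters]
  apply PySem.List.foldl_congr_mem
  intro res query _hq
  set q := pvClean query with hq
  have hhits : ((PySem.List.enumerate ((PySem.List.pyRange 0 n).map (pvDocCounter documents))).filter
        (fun p => p.2.contains q)).map (fun p => (p.1, p.2.getD q 0))
      = ((PySem.List.pyRange 0 n).filter (fun i => (pvDocCounter documents i).contains q)).map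
          (fun i => (i, (pvDocCounter documents i).getD q 0)) := by
    rw [pvEnum_map_pyRange (pvDocCounter documents) 0 n]
    rw [List.filter_map, List.map_map]
    rfl
  rw [hhits, ← hitems q]
  by_cases hc : W.contains q = true
  · rw [if_pos hc]
  · have hfalse : W.contains q = false := by simpa using hc
    have hempty : (W.getD q PySem.Dict.empty).items = [] := by
      have h2 := hinv2 q
      rw [hfalse] at h2
      have h3 : (W.getD q PySem.Dict.empty).items.isEmpty = true := by
        simpa using h2.symm
      exact List.isEmpty_iff.mp h3
    rw [if_neg hc, hempty]
    rfl
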